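-- pv_equiv track=rewrite | github.com/gudise/thesis | python/scripts/medir_garomatrix.py | printUnicodeExp
-- ===== SOURCE A (Python) =====
-- def printUnicodeExp(numero):
-- 	"""
-- 	Esta función coge un número y lo escribe como un exponente
-- 	utilizando caracteres UNICODE.
-- 	"""
-- 	super_unicode = ["\u2070","\u00B9","\u00B2","\u00B3","\u2074","\u2075","\u2076","\u2077","\u2078","\u2079"]
-- 	result=""
-- 	aux=[]
-- 	while numero>0:
-- 		aux.append(numero%10)
-- 		numero//=10
-- 	aux.reverse()
-- 	result=""
-- 	for i in aux:
-- 		result+=super_unicode[i]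
-- 	return result
-- ===== SOURCE B (Python) =====
-- def printUnicodeExp(numero):
--     """
--     Esta función coge un número y lo escribe como un exponente
--     utilizando caracteres UNICODE.
--     """
--     super_unicode = ["\u2070","\u00B9","\u00B2","\u00B3","\u2074","\u2075","\u2076","\u2077","\u2078","\u2079"]
--     if numero > 0:
--         return printUnicodeExp(numero // 10) + super_unicode[numero % 10]
--     return ""
-- ===== Notes on version B (the rewrite author's own statement) =====
-- stated objective: simpler
-- what changed: Replaces the digit-list accumulation, explicit reverse and concatenation loop with a direct recursion on the truncated quotient that emits digits most-significant-first, so no auxiliary list or reversal is needed.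
import Mathlib
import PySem

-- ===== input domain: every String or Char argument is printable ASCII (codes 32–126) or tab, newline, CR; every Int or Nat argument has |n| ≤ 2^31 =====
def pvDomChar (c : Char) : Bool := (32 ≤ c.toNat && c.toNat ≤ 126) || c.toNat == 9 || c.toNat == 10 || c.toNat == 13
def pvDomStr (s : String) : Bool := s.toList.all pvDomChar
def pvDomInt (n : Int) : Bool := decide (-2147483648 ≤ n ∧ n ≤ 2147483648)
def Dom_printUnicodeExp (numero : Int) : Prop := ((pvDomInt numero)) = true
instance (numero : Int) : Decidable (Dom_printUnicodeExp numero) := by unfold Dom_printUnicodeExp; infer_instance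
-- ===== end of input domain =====

-- ===== PORT A =====
-- B changes the decomposition (digit recursion, most-significant-first) instead of
-- A's list-accumulate-then-reverse loop; same value on every Int.

-- A's super_unicode list (shared constant of both Pythons)
def pvSuper : List String := ["\u2070","\u00B9","\u00B2","\u00B3","\u2074","\u2075","\u2076","\u2077","\u2078","\u2079"]

-- A's while loop: append numero%10, numero //= 10.  Indexing super_unicode[i] uses pyGet?;
-- i = numero%10 ∈ [0,9] so it is always in range (getD "" is never the default in fact).
def pvAWhile (numero : Int) (aux : List Int) : List Int :=
  if numero > 0 then
    pvAWhile (PySem.Int.floordiv numero 10) (aux ++ [PySem.Int.mod numero 10])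
  else aux
termination_by numero.toNat
decreasing_by
  have h10 : (0:Int) < 10 := by omega
  rw [PySem.Int.floordiv_eq_ediv_of_pos h10]
  omega

def printUnicodeExp (numero : Int) : String :=
  let aux := (pvAWhile numero []).reverse
  aux.foldl (fun result i => result ++ (PySem.List.pyGet? pvSuper i).getD "") ""

-- ===== PORT B =====
def printUnicodeExp_alt (numero : Int) : String :=
  if numero > 0 then
    printUnicodeExp_alt (PySem.Int.floordiv numero 10) ++
      (PySem.List.pyGet? pvSuper (PySem.Int.mod numero 10)).getD ""
  else ""
termination_by numero.toNat
decreasing_by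
  have h10 : (0:Int) < 10 := by omega
  rw [PySem.Int.floordiv_eq_ediv_of_pos h10]
  omega

-- ===== PRECONDITION & SPEC =====
def Spec_printUnicodeExp (numero : Int) (out : String) : Prop := out = printUnicodeExp_alt numero
instance (numero : Int) (out : String) : Decidable (Spec_printUnicodeExp numero out) := by unfold Spec_printUnicodeExp; infer_instance

-- ===== CLAIM (what is proved, stated in full; the proofs are below) =====
def Claim_equal_printUnicodeExp : Prop := ∀ (numero : Int), Dom_printUnicodeExp numero → Spec_printUnicodeExp numero (printUnicodeExp numero)

-- ===== LEMMAS AND PROOFS =====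

-- A's loop with accumulator aux is aux followed by the loop started empty
theorem pvAWhile_acc (numero : Int) (aux : List Int) :
    pvAWhile numero aux = aux ++ pvAWhile numero [] := by
  induction numero using printUnicodeExp_alt.induct generalizing aux with
  | case1 n hn ih =>
    conv_rhs => rw [pvAWhile, if_pos hn]
    rw [pvAWhile, if_pos hn, List.nil_append, ih (aux ++ [PySem.Int.mod n 10]), ih [PySem.Int.mod n 10]]
    simp
  | case2 n hn =>
    conv_rhs => rw [pvAWhile, if_neg hn]
    rw [pvAWhile, if_neg hn, List.append_nil]

-- folding string-append starting from s prepends s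
theorem pvFoldl_pre (l : List Int) (s : String) :
    l.foldl (fun result i => result ++ (PySem.List.pyGet? pvSuper i).getD "") s
      = s ++ l.foldl (fun result i => result ++ (PySem.List.pyGet? pvSuper i).getD "") "" := by
  induction l generalizing s with
  | nil => simp
  | cons d t ih =>
    simp only [List.foldl]
    rw [ih, ih ("" ++ (PySem.List.pyGet? pvSuper d).getD "")]
    simp [String.append_assoc]

-- the key induction: B's recursion equals A's reverse-and-fold
theorem pvMain (numero : Int) :
    printUnicodeExp_alt numero
      = ((pvAWhile numero []).reverse).foldl
          (fun result i => result ++ (PySem.List.pyGet? pvSuper i).getD "") "" := by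
  induction numero using printUnicodeExp_alt.induct with
  | case1 n hn ih =>
    rw [printUnicodeExp_alt, if_pos hn, pvAWhile, if_pos hn,
        pvAWhile_acc, ih]
    simp only [List.reverse_cons, List.cons_append, List.nil_append]
    rw [pvFoldl_pre]
    simp
  | case2 n hn =>
    rw [printUnicodeExp_alt, if_neg hn, pvAWhile, if_neg hn]
    simp

-- ===== VERDICT (by name: the statement is the Claim_ definition above) =====
theorem printUnicodeExp_spec : Claim_equal_printUnicodeExp := by
  intro numero _
  unfold Spec_printUnicodeExp printUnicodeExp
  exact (pvMain numero).symm
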